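-- pv_equiv track=rewrite | github.com/Pallav-cseIITD/Probability-and-stochastics | probability_simulation.py | calc_variance
-- ===== SOURCE A (Python) =====
-- M=1000000007
--
-- def mod_add(a, b):
--     a=(a%M+M)%M
--     b=(b%M+M)%M
--     return (a+b)%M
--
-- def mod_multiply(a, b):
--     a=(a%M+M)%M
--     b=(b%M+M)%M
--     return (a*b)%M
--
-- def mod_divide(a, b):
--     a=(a%M+M)%M
--     b=(b%M+M)%M
--     return mod_multiply(a, pow(b, M-2, M))
--
-- def calc_prob(alice_wins, bob_wins):
--     dp=[[0 for i in range(bob_wins+1)] for j in range (alice_wins +1)]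
--     dp[1][1] =1
--     for i in range(1, alice_wins + 1):
--         for j in range(1, bob_wins + 1):
--             if i > 1:  # Alice wins
--                 dp[i][j] = mod_add(dp[i][j], mod_multiply(dp[i-1][j], mod_divide(j ,(i-1+j))))
--             if j > 1:  # Bob wins
--                 dp[i][j] = mod_add(dp[i][j], mod_multiply(dp[i][j-1] , mod_divide(i, (i+j-1))))
--
--     return dp[alice_wins][bob_wins]
--     """
--     Returns:
--         The probability of Alice winning alice_wins times and Bob winning bob_wins times will be of the form p/q,
--         where p and q are positive integers,
--         return p.q^(-1) mod 1000000007.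
--     """
--
-- def calc_variance(t):
--     ans = 0
--     for i in range(1,t):
--         z = i - (t-i)
--         ans = mod_add(ans, mod_multiply(mod_multiply(z,z), calc_prob(i, t-i)))
--     return ans
--     """
--     Returns:
--         The variance of \sum_{i=1}^{t} Xi will be of the form p/q,
--         where p and q are positive integers,
--         return p.q^(-1) mod 1000000007.
--
--     """
-- ===== SOURCE B (Python) =====
-- M = 1000000007
--
-- def calc_variance(t):
--     # One shared DP, kept as a single diagonal (alice+bob = s), instead of
--     # re-running calc_prob's full table for every split: O(t^2) vs A's O(t^3).
--     if t < 2: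
--         return 0
--     # diag[k] = P(alice wins k+1, bob wins s-k-2... ) for current s: entry k ~ alice = k+1
--     diag = [1]  # s = 2: only state (1,1)
--     for s in range(3, t + 1):
--         inv = pow(s - 1, M - 2, M)
--         prev = diag
--         diag = []
--         for i in range(1, s):
--             a = prev[i - 2] * (s - i) % M if i >= 2 else 0
--             b = prev[i - 1] * i % M if i <= s - 2 else 0
--             diag.append((a + b) * inv % M)
--     return sum((2 * i - t) ** 2 * diag[i - 1] % M for i in range(1, t)) % M
-- ===== Notes on version B (the rewrite author's own statement) =====
-- stated objective: faster
-- what changed: A rebuilds calc_prob's full (i)x(t-i) modular DP table from scratch for every split i (O(t^3)); B fills one shared DP diagonal-by-diagonal once, keeping only the current diagonal dp[i][s-i], and reads all t-1 probabilities from the final diagonal (O(t^2), O(t) space).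
import Mathlib
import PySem

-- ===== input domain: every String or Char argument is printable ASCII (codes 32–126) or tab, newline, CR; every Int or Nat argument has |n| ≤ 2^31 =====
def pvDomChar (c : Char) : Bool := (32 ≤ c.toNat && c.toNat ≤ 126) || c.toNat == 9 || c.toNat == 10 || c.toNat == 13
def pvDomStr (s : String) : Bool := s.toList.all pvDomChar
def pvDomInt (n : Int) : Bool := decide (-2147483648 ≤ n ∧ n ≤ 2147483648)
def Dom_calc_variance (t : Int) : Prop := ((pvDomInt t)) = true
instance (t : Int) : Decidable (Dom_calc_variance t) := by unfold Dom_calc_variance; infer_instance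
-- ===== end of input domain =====

-- B replaces A's per-split O(t^2) DP (calc_prob rebuilt for every i) by one shared
-- diagonal-by-diagonal DP filled once: O(t^2) total instead of O(t^3).

-- Python's three-argument pow(b, e, m), m > 0, by binary exponentiation.
-- (PySem.Int.powMod reduces b^e literally, which is not evaluable at e = M-2 ≈ 10^9;
-- this helper is the same function computed by repeated squaring, exact for m > 0.)
def pypow3 (b : Int) (e : Nat) (m : Int) : Int :=
  if e = 0 then PySem.Int.mod 1 m
  else
    let r := pypow3 (PySem.Int.mod (b * b) m) (e / 2) m
    if e % 2 = 1 then PySem.Int.mod (r * b) m else r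
termination_by e
decreasing_by omega

-- ===== PORT A =====
def pvM : Int := 1000000007

def mod_add (a b : Int) : Int :=
  let a := PySem.Int.mod (PySem.Int.mod a pvM + pvM) pvM
  let b := PySem.Int.mod (PySem.Int.mod b pvM + pvM) pvM
  PySem.Int.mod (a + b) pvM

def mod_multiply (a b : Int) : Int :=
  let a := PySem.Int.mod (PySem.Int.mod a pvM + pvM) pvM
  let b := PySem.Int.mod (PySem.Int.mod b pvM + pvM) pvM
  PySem.Int.mod (a * b) pvM

def mod_divide (a b : Int) : Int :=
  let a := PySem.Int.mod (PySem.Int.mod a pvM + pvM) pvM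
  let b := PySem.Int.mod (PySem.Int.mod b pvM + pvM) pvM
  mod_multiply a (pypow3 b (pvM - 2).toNat pvM)

-- dp[i][j] read/write; every access made by A is in range (calc_variance calls
-- calc_prob only with alice_wins ≥ 1 and bob_wins ≥ 1), so getD/set are exact there.
def pyGet2 (dp : List (List Int)) (i j : Nat) : Int := (dp.getD i []).getD j 0
def pySet2 (dp : List (List Int)) (i j : Nat) (v : Int) : List (List Int) :=
  dp.set i ((dp.getD i []).set j v)

def calc_prob (alice_wins bob_wins : Int) : Int :=
  let an := alice_wins.toNat   -- loop bounds; ≥ 1 on every call A makes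
  let bn := bob_wins.toNat
  let dp := List.replicate (an + 1) (List.replicate (bn + 1) (0 : Int))
  let dp := pySet2 dp 1 1 1
  let dp := (List.range' 1 an).foldl (fun dp i =>
    (List.range' 1 bn).foldl (fun dp j =>
      let dp := if 1 < i then
          pySet2 dp i j (mod_add (pyGet2 dp i j)
            (mod_multiply (pyGet2 dp (i-1) j) (mod_divide (j:Int) ((i:Int) - 1 + (j:Int)))))
        else dp
      if 1 < j then
          pySet2 dp i j (mod_add (pyGet2 dp i j)
            (mod_multiply (pyGet2 dp i (j-1)) (mod_divide (i:Int) ((i:Int) + (j:Int) - 1))))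
        else dp) dp) dp
  pyGet2 dp an bn

def calc_variance (t : Int) : Int :=
  (List.range' 1 (t - 1).toNat).foldl (fun (ans : Int) (i : Nat) =>
    let z : Int := (i:Int) - (t - (i:Int))
    mod_add ans (mod_multiply (mod_multiply z z) (calc_prob (i:Int) (t - (i:Int))))) 0

-- ===== PORT B =====
def calc_variance_alt (t : Int) : Int :=
  if t < 2 then 0
  else
    -- diag after processing s: entry k holds P(alice = k+1, bob = s-k-1)
    let diag := (List.range' 3 (t.toNat - 2)).foldl (fun prev (s : Nat) =>
      let inv := pypow3 ((s:Int) - 1) (pvM - 2).toNat pvM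
      (List.range' 1 (s - 1)).map (fun (i : Nat) =>
        let a : Int := if 2 ≤ i then PySem.Int.mod (prev.getD (i-2) 0 * ((s:Int) - (i:Int))) pvM else 0
        let b : Int := if i ≤ s - 2 then PySem.Int.mod (prev.getD (i-1) 0 * (i:Int)) pvM else 0
        PySem.Int.mod ((a + b) * inv) pvM)) [1]
    PySem.Int.mod (((List.range' 1 (t.toNat - 1)).map (fun (i : Nat) =>
      PySem.Int.mod ((2 * (i:Int) - t) ^ 2 * diag.getD (i-1) 0) pvM)).sum) pvM

-- ===== PRECONDITION & SPEC =====
def Spec_calc_variance (t : Int) (out : Int) : Prop := out = calc_variance_alt t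
instance (t : Int) (out : Int) : Decidable (Spec_calc_variance t out) := by unfold Spec_calc_variance; infer_instance

-- ===== CLAIM (what is proved, stated in full; the proofs are below) =====
def Claim_equal_calc_variance : Prop := ∀ (t : Int), Dom_calc_variance t → Spec_calc_variance t (calc_variance t)

-- ===== LEMMAS AND PROOFS =====

-- the common mathematical value of dp[i][j] (probability numerator mod pvM)
def pvF (i j : Nat) : Int :=
  if i = 1 ∧ j = 1 then 1
  else
    ((if _h : 2 ≤ i then pvF (i-1) j * (j:Int) % pvM else 0)
      + (if _h : 2 ≤ j then pvF i (j-1) * (i:Int) % pvM else 0))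
      * pypow3 ((i:Int) + (j:Int) - 1) (pvM - 2).toNat pvM % pvM
termination_by (i, j)
decreasing_by all_goals omega

lemma pvM_pos : (0:Int) < pvM := by norm_num [pvM]

lemma pymod_eq (a : Int) : PySem.Int.mod a pvM = a % pvM :=
  PySem.Int.mod_eq_emod_of_pos pvM_pos

lemma norm_eq (a : Int) : PySem.Int.mod (PySem.Int.mod a pvM + pvM) pvM = a % pvM := by
  rw [pymod_eq, pymod_eq]; simp only [pvM]; omega

lemma mod_add_eq (a b : Int) : mod_add a b = (a + b) % pvM := by
  unfold mod_add
  rw [norm_eq, norm_eq, pymod_eq, ← Int.add_emod]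

lemma mod_multiply_eq (a b : Int) : mod_multiply a b = (a * b) % pvM := by
  unfold mod_multiply
  rw [norm_eq, norm_eq, pymod_eq, ← Int.mul_emod]

lemma pypow3_congr (a b : Int) (e : Nat) (h : a % pvM = b % pvM) :
    pypow3 a e pvM = pypow3 b e pvM := by
  induction e using Nat.strong_induction_on generalizing a b with
  | _ e ih =>
    conv_lhs => rw [pypow3]
    conv_rhs => rw [pypow3]
    by_cases he : e = 0
    · simp [he]
    · simp only [he, if_false]
      have hbase : (a * a) % pvM = (b * b) % pvM := by
        rw [Int.mul_emod, h, ← Int.mul_emod]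
      have hr : pypow3 (PySem.Int.mod (a * a) pvM) (e / 2) pvM
              = pypow3 (PySem.Int.mod (b * b) pvM) (e / 2) pvM := by
        apply ih _ (by omega)
        rw [pymod_eq, pymod_eq, Int.emod_emod_of_dvd _ dvd_rfl,
          Int.emod_emod_of_dvd _ dvd_rfl, hbase]
      rw [hr]
      by_cases ho : e % 2 = 1
      · simp only [ho, if_pos, pymod_eq]
        rw [Int.mul_emod, h, ← Int.mul_emod]
      · simp [ho]

lemma mod_divide_eq (a b : Int) :
    mod_divide a b = a * pypow3 b (pvM - 2).toNat pvM % pvM := by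
  unfold mod_divide
  rw [norm_eq, norm_eq, mod_multiply_eq,
    pypow3_congr (b % pvM) b _ (Int.emod_emod_of_dvd b dvd_rfl)]
  conv_lhs => rw [Int.mul_emod, Int.emod_emod_of_dvd _ dvd_rfl]
  rw [← Int.mul_emod]

lemma pvF_one_one : pvF 1 1 = 1 := by rw [pvF]; simp

-- modular-arithmetic regrouping: A's per-term division vs B's shared division
lemma pv_emod_cong : ∀ z : Int, z % pvM ≡ z [ZMOD pvM] :=
  fun z => Int.emod_emod_of_dvd z dvd_rfl

lemma pv_two_term (x y u v pw : Int) :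
    ((0 + (x * ((u * pw) % pvM)) % pvM) % pvM + (y * ((v * pw) % pvM)) % pvM) % pvM
      = (((x * u % pvM) + (y * v % pvM)) * pw) % pvM := by
  have e := pv_emod_cong
  have hx : (x * ((u * pw) % pvM)) % pvM ≡ x * (u * pw) [ZMOD pvM] :=
    (e _).trans ((Int.ModEq.refl x).mul (e _))
  have hy : (y * ((v * pw) % pvM)) % pvM ≡ y * (v * pw) [ZMOD pvM] :=
    (e _).trans ((Int.ModEq.refl y).mul (e _))
  show Int.ModEq pvM _ _
  calc (0 + (x * ((u * pw) % pvM)) % pvM) % pvM + (y * ((v * pw) % pvM)) % pvM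
      ≡ (0 + x * (u * pw)) + y * (v * pw) [ZMOD pvM] :=
        ((e _).trans ((Int.ModEq.refl 0).add hx)).add hy
    _ = (x * u + y * v) * pw := by ring
    _ ≡ ((x * u % pvM) + (y * v % pvM)) * pw [ZMOD pvM] :=
        (((e _).add (e _)).mul (Int.ModEq.refl pw)).symm

lemma pv_one_term_l (x u pw : Int) :
    (0 + (x * ((u * pw) % pvM)) % pvM) % pvM = ((x * u % pvM + 0) * pw) % pvM := by
  have e := pv_emod_cong
  show Int.ModEq pvM _ _
  calc 0 + (x * ((u * pw) % pvM)) % pvM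
      ≡ 0 + x * (u * pw) [ZMOD pvM] := (Int.ModEq.refl 0).add ((e _).trans ((Int.ModEq.refl x).mul (e _)))
    _ = (x * u + 0) * pw := by ring
    _ ≡ (x * u % pvM + 0) * pw [ZMOD pvM] := (((e _).add (Int.ModEq.refl 0)).mul (Int.ModEq.refl pw)).symm

lemma pv_one_term_r (y v pw : Int) :
    (0 + (y * ((v * pw) % pvM)) % pvM) % pvM = ((0 + y * v % pvM) * pw) % pvM := by
  have e := pv_emod_cong
  show Int.ModEq pvM _ _
  calc 0 + (y * ((v * pw) % pvM)) % pvM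
      ≡ 0 + y * (v * pw) [ZMOD pvM] := (Int.ModEq.refl 0).add ((e _).trans ((Int.ModEq.refl y).mul (e _)))
    _ = (0 + y * v) * pw := by ring
    _ ≡ (0 + y * v % pvM) * pw [ZMOD pvM] := ((Int.ModEq.refl 0).add (e _)).mul (Int.ModEq.refl pw) |>.symm

-- the arithmetic core: A's two guarded updates produce pvF i j
lemma step_eq (i j : Nat) (hi : 1 ≤ i) (hj : 1 ≤ j) (hne : ¬(i = 1 ∧ j = 1)) :
    (if 1 < j then
        mod_add (if 1 < i then
            mod_add 0 (mod_multiply (pvF (i-1) j) (mod_divide (j:Int) ((i:Int) - 1 + (j:Int))))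
          else 0)
          (mod_multiply (pvF i (j-1)) (mod_divide (i:Int) ((i:Int) + (j:Int) - 1)))
      else if 1 < i then
        mod_add 0 (mod_multiply (pvF (i-1) j) (mod_divide (j:Int) ((i:Int) - 1 + (j:Int))))
      else 0) = pvF i j := by
  have harg : ((i:Int) - 1 + (j:Int)) = ((i:Int) + (j:Int) - 1) := by ring
  conv_rhs => rw [pvF]
  rw [if_neg hne]
  by_cases hi2 : 2 ≤ i <;> by_cases hj2 : 2 ≤ j
  · rw [if_pos (show 1 < j by omega), if_pos (show 1 < i by omega),
      dif_pos hi2, dif_pos hj2,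
      mod_divide_eq, mod_divide_eq, harg, mod_multiply_eq, mod_multiply_eq,
      mod_add_eq, mod_add_eq]
    exact pv_two_term _ _ _ _ _
  · rw [if_neg (show ¬ 1 < j by omega), if_pos (show 1 < i by omega),
      dif_pos hi2, dif_neg hj2,
      mod_divide_eq, harg, mod_multiply_eq, mod_add_eq]
    exact pv_one_term_l _ _ _
  · rw [if_pos (show 1 < j by omega), if_neg (show ¬ 1 < i by omega),
      dif_neg hi2, dif_pos hj2,
      mod_divide_eq, mod_multiply_eq, mod_add_eq]
    exact pv_one_term_r _ _ _
  · omega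

-- functional view of A's table
def pvTab (an bn : Nat) (g : Nat → Nat → Int) : List (List Int) :=
  (List.range (an+1)).map (fun i => (List.range (bn+1)).map (g i))

def pvUpd (g : Nat → Nat → Int) (i j : Nat) (v : Int) : Nat → Nat → Int :=
  fun i' j' => if i' = i ∧ j' = j then v else g i' j'

-- the table contents after fully processing rows < i and columns ≤ c of row i
def pvSt (i c : Nat) : Nat → Nat → Int := fun i' j' =>
  if (1 ≤ i' ∧ i' < i ∧ 1 ≤ j') ∨ (i' = i ∧ 1 ≤ j' ∧ j' ≤ c) then pvF i' j'
  else if i' = 1 ∧ j' = 1 then 1 else 0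

lemma get2_tab (an bn : Nat) (g : Nat → Nat → Int) (i j : Nat)
    (hi : i ≤ an) (hj : j ≤ bn) : pyGet2 (pvTab an bn g) i j = g i j := by
  unfold pyGet2 pvTab
  have h1 : i < ((List.range (an+1)).map
      (fun i => (List.range (bn+1)).map (g i))).length := by simp; omega
  rw [List.getD_eq_getElem _ _ h1, List.getElem_map, List.getElem_range]
  have h2 : j < ((List.range (bn+1)).map (g i)).length := by simp; omega
  rw [List.getD_eq_getElem _ _ h2, List.getElem_map, List.getElem_range]

lemma set2_tab (an bn : Nat) (g : Nat → Nat → Int) (i j : Nat) (v : Int)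
    (hi : i ≤ an) (hj : j ≤ bn) :
    pySet2 (pvTab an bn g) i j v = pvTab an bn (pvUpd g i j v) := by
  unfold pySet2 pvTab pvUpd
  have hrow : ((List.range (an+1)).map
      (fun i => (List.range (bn+1)).map (g i))).getD i [] = (List.range (bn+1)).map (g i) := by
    rw [List.getD_eq_getElem _ _ (by simp; omega), List.getElem_map, List.getElem_range]
  rw [hrow]
  apply List.ext_getElem (by simp)
  intro k hk1 hk2
  simp only [List.getElem_set, List.getElem_map, List.getElem_range]
  by_cases hik : i = k
  · subst hik
    rw [if_pos rfl]
    apply List.ext_getElem (by simp)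
    intro l hl1 hl2
    simp only [List.getElem_set, List.getElem_map, List.getElem_range]
    by_cases hjl : j = l
    · subst hjl; simp
    · rw [if_neg hjl, if_neg (by tauto)]
  · rw [if_neg hik]
    apply List.map_congr_left
    intro l _
    rw [if_neg (by tauto)]

lemma tab_congr (an bn : Nat) (g g' : Nat → Nat → Int)
    (h : ∀ i j, i ≤ an → j ≤ bn → g i j = g' i j) : pvTab an bn g = pvTab an bn g' := by
  unfold pvTab
  apply List.map_congr_left
  intro i hi
  apply List.map_congr_left
  intro j hj
  exact h i j (by simp at hi; omega) (by simp at hj; omega)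

-- calc_prob's inner-loop body (named for the invariant proofs)
def pvBody (i : Nat) : List (List Int) → Nat → List (List Int) := fun dp j =>
  let dp := if 1 < i then
      pySet2 dp i j (mod_add (pyGet2 dp i j)
        (mod_multiply (pyGet2 dp (i-1) j) (mod_divide (j:Int) ((i:Int) - 1 + (j:Int)))))
    else dp
  if 1 < j then
      pySet2 dp i j (mod_add (pyGet2 dp i j)
        (mod_multiply (pyGet2 dp i (j-1)) (mod_divide (i:Int) ((i:Int) + (j:Int) - 1))))
    else dp

lemma inner_step (an bn i c : Nat) (hi : 1 ≤ i) (hian : i ≤ an) (hc : c + 1 ≤ bn) :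
    pvBody i (pvTab an bn (pvSt i c)) (c + 1) = pvTab an bn (pvSt i (c + 1)) := by
  have hj : 1 ≤ c + 1 := by omega
  set j := c + 1 with hjdef
  unfold pvBody
  by_cases hne : i = 1 ∧ j = 1
  · -- (1,1): no update happens; the cell already holds pvF 1 1 = 1
    obtain ⟨hi1, hj1⟩ := hne
    simp only [hi1, hj1]
    rw [if_neg (by omega), if_neg (by omega)]
    apply tab_congr
    intro i' j' hi' hj'
    unfold pvSt
    split_ifs <;> first | rfl | omega | (exfalso; omega) | (simp_all [pvF_one_one]; done)
  · have hcur : pvSt i c i j = 0 := by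
      unfold pvSt
      rw [if_neg (by omega), if_neg (by tauto)]
    by_cases hi2 : 1 < i
    · -- first guarded update fires
      rw [if_pos hi2, get2_tab _ _ _ _ _ hian hc, get2_tab _ _ _ _ _ (by omega) hc, hcur]
      have hprev : pvSt i c (i-1) j = pvF (i-1) j := by
        unfold pvSt; rw [if_pos (by omega)]
      rw [hprev, set2_tab _ _ _ _ _ _ hian hc]
      by_cases hj2 : 1 < j
      · rw [if_pos hj2, get2_tab _ _ _ _ _ hian hc, get2_tab _ _ _ _ _ hian (by omega)]
        have h1 : pvUpd (pvSt i c) i j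
            (mod_add 0 (mod_multiply (pvF (i-1) j) (mod_divide (j:Int) ((i:Int) - 1 + (j:Int))))) i j
            = mod_add 0 (mod_multiply (pvF (i-1) j) (mod_divide (j:Int) ((i:Int) - 1 + (j:Int)))) := by
          unfold pvUpd; rw [if_pos ⟨rfl, rfl⟩]
        have h2 : pvUpd (pvSt i c) i j
            (mod_add 0 (mod_multiply (pvF (i-1) j) (mod_divide (j:Int) ((i:Int) - 1 + (j:Int))))) i (j-1)
            = pvF i (j-1) := by
          unfold pvUpd
          rw [if_neg (by omega)]
          unfold pvSt; rw [if_pos (by omega)]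
        rw [h1, h2, set2_tab _ _ _ _ _ _ hian hc]
        apply tab_congr
        intro i' j' hi' hj'
        unfold pvUpd
        by_cases hij : i' = i ∧ j' = j
        · rw [if_pos hij]
          obtain ⟨e1, e2⟩ := hij
          have := step_eq i j hi hj hne
          rw [if_pos hj2, if_pos hi2] at this
          rw [this, e1, e2]
          unfold pvSt; rw [if_pos (by omega)]
        · rw [if_neg hij, if_neg hij]
          unfold pvSt
          split_ifs <;> first | rfl | omega | (exfalso; omega)
      · -- j = 1 < i : only the first update
        rw [if_neg hj2]
        apply tab_congr
        intro i' j' hi' hj'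
        unfold pvUpd
        by_cases hij : i' = i ∧ j' = j
        · rw [if_pos hij]
          obtain ⟨e1, e2⟩ := hij
          have := step_eq i j hi hj hne
          rw [if_neg hj2, if_pos hi2] at this
          rw [this, e1, e2]
          unfold pvSt; rw [if_pos (by omega)]
        · rw [if_neg hij]
          unfold pvSt
          split_ifs <;> first | rfl | omega | (exfalso; omega)
    · -- i = 1, so j > 1 : only the second update
      have hj2 : 1 < j := by omega
      rw [if_neg hi2, if_pos hj2, get2_tab _ _ _ _ _ hian hc, hcur,
        get2_tab _ _ _ _ _ hian (by omega)]
      have hprev : pvSt i c i (j-1) = pvF i (j-1) := by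
        unfold pvSt; rw [if_pos (by omega)]
      rw [hprev, set2_tab _ _ _ _ _ _ hian hc]
      apply tab_congr
      intro i' j' hi' hj'
      unfold pvUpd
      by_cases hij : i' = i ∧ j' = j
      · rw [if_pos hij]
        obtain ⟨e1, e2⟩ := hij
        have := step_eq i j hi hj hne
        rw [if_pos hj2, if_neg hi2] at this
        rw [this, e1, e2]
        unfold pvSt; rw [if_pos (by omega)]
      · rw [if_neg hij]
        unfold pvSt
        split_ifs <;> first | rfl | omega | (exfalso; omega)

lemma inner_fold (an bn i : Nat) (hi : 1 ≤ i) (hian : i ≤ an) :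
    ∀ c, c ≤ bn →
    (List.range' 1 c).foldl (pvBody i) (pvTab an bn (pvSt i 0)) = pvTab an bn (pvSt i c) := by
  intro c
  induction c with
  | zero => intro _; rfl
  | succ c ih =>
    intro hc
    rw [List.range'_concat, List.foldl_append, ih (by omega)]
    simp only [List.foldl_cons, List.foldl_nil, show 1 + 1 * c = c + 1 from by omega]
    exact inner_step an bn i c hi hian hc

lemma st_row_done (an bn i : Nat) (hi : 1 ≤ i) :
    pvTab an bn (pvSt i bn) = pvTab an bn (pvSt (i+1) 0) := by
  apply tab_congr
  intro i' j' hi' hj'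
  unfold pvSt
  by_cases h1 : (1 ≤ i' ∧ i' < i ∧ 1 ≤ j') ∨ (i' = i ∧ 1 ≤ j' ∧ j' ≤ bn)
  · rw [if_pos h1, if_pos (show (1 ≤ i' ∧ i' < i+1 ∧ 1 ≤ j') ∨ (i' = i+1 ∧ 1 ≤ j' ∧ j' ≤ 0)
      by omega)]
  · rw [if_neg h1, if_neg (show ¬((1 ≤ i' ∧ i' < i+1 ∧ 1 ≤ j') ∨ (i' = i+1 ∧ 1 ≤ j' ∧ j' ≤ 0))
      by omega)]

lemma outer_fold (an bn : Nat) :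
    ∀ r, r ≤ an →
    (List.range' 1 r).foldl (fun dp i => (List.range' 1 bn).foldl (pvBody i) dp)
      (pvTab an bn (pvSt 1 0)) = pvTab an bn (pvSt (r+1) 0) := by
  intro r
  induction r with
  | zero => intro _; rfl
  | succ r ih =>
    intro hr
    rw [List.range'_concat, List.foldl_append, ih (by omega)]
    simp only [List.foldl_cons, List.foldl_nil, show 1 + 1 * r = r + 1 from by omega]
    rw [inner_fold an bn (r+1) (by omega) (by omega) bn le_rfl]
    exact st_row_done an bn (r+1) (by omega)

lemma tab_init (an bn : Nat) (ha : 1 ≤ an) (hb : 1 ≤ bn) :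
    pySet2 (List.replicate (an+1) (List.replicate (bn+1) (0:Int))) 1 1 1
      = pvTab an bn (pvSt 1 0) := by
  have hz : List.replicate (an+1) (List.replicate (bn+1) (0:Int))
      = pvTab an bn (fun _ _ => 0) := by
    unfold pvTab
    apply List.ext_getElem (by simp)
    intro k h1 h2
    simp
  rw [hz, set2_tab _ _ _ _ _ _ ha hb]
  apply tab_congr
  intro i' j' hi' hj'
  unfold pvUpd pvSt
  split_ifs <;> first | rfl | omega

lemma calc_prob_eq (aw bw : Int) (ha : 1 ≤ aw) (hb : 1 ≤ bw) :
    calc_prob aw bw = pvF aw.toNat bw.toNat := by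
  simp only [calc_prob]
  have ha' : 1 ≤ aw.toNat := by omega
  have hb' : 1 ≤ bw.toNat := by omega
  rw [tab_init _ _ ha' hb']
  rw [show (fun (dp : List (List Int)) (i : Nat) =>
      (List.range' 1 bw.toNat).foldl (fun dp j =>
        let dp := if 1 < i then
            pySet2 dp i j (mod_add (pyGet2 dp i j)
              (mod_multiply (pyGet2 dp (i-1) j) (mod_divide (j:Int) ((i:Int) - 1 + (j:Int)))))
          else dp
        if 1 < j then
            pySet2 dp i j (mod_add (pyGet2 dp i j)
              (mod_multiply (pyGet2 dp i (j-1)) (mod_divide (i:Int) ((i:Int) + (j:Int) - 1))))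
          else dp) dp)
    = (fun dp i => (List.range' 1 bw.toNat).foldl (pvBody i) dp) from rfl]
  rw [outer_fold aw.toNat bw.toNat aw.toNat le_rfl]
  rw [get2_tab _ _ _ _ _ le_rfl le_rfl]
  unfold pvSt
  rw [if_pos (by omega)]

-- B's diagonal after processing s = c+2
lemma diag_eq (c : Nat) :
    (List.range' 3 c).foldl (fun prev (s : Nat) =>
      let inv := pypow3 ((s:Int) - 1) (pvM - 2).toNat pvM
      (List.range' 1 (s - 1)).map (fun (i : Nat) =>
        let a : Int := if 2 ≤ i then PySem.Int.mod (prev.getD (i-2) 0 * ((s:Int) - (i:Int))) pvM else 0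
        let b : Int := if i ≤ s - 2 then PySem.Int.mod (prev.getD (i-1) 0 * (i:Int)) pvM else 0
        PySem.Int.mod ((a + b) * inv) pvM)) [1]
    = (List.range' 1 (c+1)).map (fun i => pvF i (c+2-i)) := by
  induction c with
  | zero =>
    simp [List.range']
    rw [pvF_one_one]
  | succ c ih =>
    rw [List.range'_concat, List.foldl_append, ih]
    simp only [List.foldl_cons, List.foldl_nil]
    rw [show 3 + 1 * c = c + 3 from by omega]
    simp only [show c + 3 - 1 = c + 2 from by omega, show c + 1 + 1 = c + 2 from by omega,
      show c + 3 - 2 = c + 1 from by omega]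
    apply List.map_congr_left
    intro i hmem
    rw [List.mem_range'_1] at hmem
    obtain ⟨hi1, hi2⟩ := hmem
    have hi2' : i ≤ c + 2 := by omega
    simp only [show c + 1 + 2 - i = c + 3 - i from by omega]
    -- resolve the two getD reads
    have hga : 2 ≤ i → ((List.range' 1 (c+1)).map (fun i => pvF i (c+2-i))).getD (i-2) 0
        = pvF (i-1) (c+3-i) := by
      intro h2
      rw [List.getD_eq_getElem _ _ (by simp [List.length_range']; omega), List.getElem_map,
        List.getElem_range']
      congr 1 <;> omega
    have hgb : i ≤ c + 1 → ((List.range' 1 (c+1)).map (fun i => pvF i (c+2-i))).getD (i-1) 0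
        = pvF i (c+2-i) := by
      intro h2
      rw [List.getD_eq_getElem _ _ (by simp [List.length_range']; omega), List.getElem_map,
        List.getElem_range']
      congr 1 <;> omega
    -- unfold the specification at (i, c+3-i)
    have hne : ¬(i = 1 ∧ c + 3 - i = 1) := by omega
    conv_rhs => rw [pvF, if_neg hne]
    have hcast1 : ((c+3-i : Nat) : Int) = ((c+3 : Nat) : Int) - (i : Int) := by
      push_cast [Nat.cast_sub (by omega : i ≤ c + 3)]; ring
    have hcastpw : (i:Int) + ((c+3-i : Nat) : Int) - 1 = ((c+3 : Nat) : Int) - 1 := by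
      rw [hcast1]; ring
    rw [hcastpw]
    by_cases h2 : 2 ≤ i <;> by_cases h3 : i ≤ c + 1
    · rw [if_pos h2, if_pos h3, dif_pos h2, dif_pos (show 2 ≤ c + 3 - i by omega),
        hga h2, hgb h3]
      simp only [pymod_eq, hcast1, show c + 3 - i - 1 = c + 2 - i from by omega]
    · rw [if_pos h2, if_neg h3, dif_pos h2, dif_neg (show ¬ 2 ≤ c + 3 - i by omega),
        hga h2]
      simp only [pymod_eq, hcast1]
    · rw [if_neg h2, if_pos h3, dif_neg h2, dif_pos (show 2 ≤ c + 3 - i by omega),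
        hgb h3]
      simp only [pymod_eq, show c + 3 - i - 1 = c + 2 - i from by omega]
    · omega

-- A's accumulating fold is the mod of the sum
lemma foldl_modadd (l : List Nat) (f : Nat → Int) (a : Int) (h0 : 0 ≤ a) (h1 : a < pvM) :
    l.foldl (fun ans i => mod_add ans (f i)) a = (a + (l.map f).sum) % pvM := by
  induction l generalizing a with
  | nil =>
    simp only [List.foldl_nil, List.map_nil, List.sum_nil, add_zero]
    rw [Int.emod_eq_of_lt h0 h1]
  | cons x l ih =>
    have hb0 : 0 ≤ mod_add a (f x) := by
      rw [mod_add_eq]; exact Int.emod_nonneg _ (by norm_num [pvM])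
    have hb1 : mod_add a (f x) < pvM := by
      rw [mod_add_eq]; exact Int.emod_lt_of_pos _ pvM_pos
    rw [List.foldl_cons, ih _ hb0 hb1, mod_add_eq, List.map_cons, List.sum_cons,
      Int.emod_add_emod, add_assoc]

-- ===== VERDICT (by name: the statement is the Claim_ definition above) =====
theorem calc_variance_spec : Claim_equal_calc_variance := by
  unfold Claim_equal_calc_variance Spec_calc_variance
  intro t _
  by_cases ht : t < 2
  · simp only [calc_variance, calc_variance_alt, if_pos ht,
      show (t-1).toNat = 0 from by omega]
    rfl
  · have hn2 : 2 ≤ t.toNat := by omega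
    have htn : t = (t.toNat : Int) := by omega
    simp only [calc_variance, calc_variance_alt, if_neg ht]
    rw [diag_eq (t.toNat - 2)]
    simp only [show t.toNat - 2 + 1 = t.toNat - 1 from by omega,
      show t.toNat - 2 + 2 = t.toNat from by omega]
    rw [foldl_modadd (List.range' 1 (t-1).toNat)
      (fun (i : Nat) => mod_multiply
        (mod_multiply ((i:Int) - (t - (i:Int))) ((i:Int) - (t - (i:Int))))
        (calc_prob (i:Int) (t - (i:Int)))) 0 le_rfl pvM_pos, zero_add, pymod_eq,
      show (t-1).toNat = t.toNat - 1 from by omega]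
    have hmap : (List.range' 1 (t.toNat - 1)).map
        (fun (i : Nat) => mod_multiply
          (mod_multiply ((i:Int) - (t - (i:Int))) ((i:Int) - (t - (i:Int))))
          (calc_prob (i:Int) (t - (i:Int))))
        = (List.range' 1 (t.toNat - 1)).map (fun (i : Nat) =>
            PySem.Int.mod ((2 * (i:Int) - t) ^ 2 *
              ((List.range' 1 (t.toNat - 1)).map (fun i => pvF i (t.toNat - i))).getD (i-1) 0) pvM) := by
      apply List.map_congr_left
      intro i hmem
      rw [List.mem_range'_1] at hmem
      obtain ⟨hi1, hi2⟩ := hmem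
      have hgd : ((List.range' 1 (t.toNat - 1)).map
          (fun i => pvF i (t.toNat - i))).getD (i-1) 0 = pvF i (t.toNat - i) := by
        rw [List.getD_eq_getElem _ _ (by simp [List.length_range']; omega), List.getElem_map,
          List.getElem_range']
        congr 1 <;> omega
      have hcp : calc_prob (i:Int) (t - (i:Int)) = pvF i (t.toNat - i) := by
        rw [calc_prob_eq _ _ (by omega : (1:Int) ≤ (i:Int)) (by omega : (1:Int) ≤ t - (i:Int)),
          Int.toNat_natCast]
        congr 1
        omega
      rw [hgd, hcp, pymod_eq, mod_multiply_eq, mod_multiply_eq]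
      conv_lhs => rw [Int.mul_emod, Int.emod_emod_of_dvd _ dvd_rfl]
      rw [← Int.mul_emod,
        show ((i:Int) - (t - (i:Int))) * ((i:Int) - (t - (i:Int))) = (2 * (i:Int) - t) ^ 2
          from by ring]
    rw [hmap]
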